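-- pv_equiv track=rewrite | github.com/garricn/premiumflow | src/rollchain/services/chain_builder.py | group_by_ticker
-- ===== SOURCE A (Python) =====
-- from typing import Any, Dict, List, Optional, Set
--
-- def group_by_ticker(transactions: List[Dict[str, str]]) -> Dict[str, List[Dict[str, str]]]:
--     """Group transactions by ticker symbol."""
--     grouped = {}
--     for txn in transactions:
--         ticker = txn.get('Instrument', '').strip()
--         if ticker not in grouped:
--             grouped[ticker] = []
--         grouped[ticker].append(txn)
--     return grouped
-- ===== SOURCE B (Python) =====
-- def group_by_ticker(transactions):
--     """Group transactions by ticker symbol."""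
--     def key(txn):
--         return txn.get('Instrument', '').strip()
--     keys = dict.fromkeys(key(txn) for txn in transactions)
--     return {k: [txn for txn in transactions if key(txn) == k] for k in keys}
-- ===== Notes on version B (the rewrite author's own statement) =====
-- stated objective: alternative
-- what changed: B replaces A's single incremental hashing pass (create-then-append per transaction) with a two-pass decomposition: collect the distinct ticker keys in first-occurrence order, then build each group by filtering the whole transaction list per key.
import Mathlib
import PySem

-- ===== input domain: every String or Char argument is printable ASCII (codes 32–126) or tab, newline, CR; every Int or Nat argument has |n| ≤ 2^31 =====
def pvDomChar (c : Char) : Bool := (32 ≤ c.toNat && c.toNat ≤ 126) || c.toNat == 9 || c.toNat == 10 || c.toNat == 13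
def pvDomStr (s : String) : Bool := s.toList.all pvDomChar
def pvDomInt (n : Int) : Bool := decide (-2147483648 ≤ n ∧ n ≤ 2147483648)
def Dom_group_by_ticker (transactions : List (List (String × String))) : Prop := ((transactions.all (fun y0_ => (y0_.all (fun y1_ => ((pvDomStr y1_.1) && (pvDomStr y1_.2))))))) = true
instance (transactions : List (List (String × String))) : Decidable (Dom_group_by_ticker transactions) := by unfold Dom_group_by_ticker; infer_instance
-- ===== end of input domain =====

-- B groups by distinct keys in first-occurrence order, then filters per key (alternative decomposition, same result).

-- txn.get('Instrument', '').strip() — shared key extraction of both Pythons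
def tickerOf (txn : List (String × String)) : String :=
  PySem.Str.strip ((PySem.Dict.mk txn).getD "Instrument" "")

-- ===== PORT A =====
-- A: one incremental pass over the transactions, creating the empty group on first sight, then appending
def group_by_ticker (transactions : List (List (String × String))) : List (String × List (List (String × String))) :=
  (transactions.foldl
    (fun grouped txn =>
      let ticker := tickerOf txn
      let grouped := if grouped.contains ticker then grouped else grouped.insert ticker []
      grouped.modify ticker [] (· ++ [txn]))
    PySem.Dict.empty).items

-- ===== PORT B =====
-- B: distinct keys in first-occurrence order, then one filter per key
def group_by_ticker_alt (transactions : List (List (String × String))) : List (String × List (List (String × String))) :=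
  (PySem.List.dedup (transactions.map tickerOf)).map
    (fun k => (k, transactions.filter (fun txn => tickerOf txn == k)))

-- ===== PRECONDITION & SPEC =====
def Spec_group_by_ticker (transactions : List (List (String × String))) (out : List (String × List (List (String × String)))) : Prop := out = group_by_ticker_alt transactions
instance (transactions : List (List (String × String))) (out : List (String × List (List (String × String)))) : Decidable (Spec_group_by_ticker transactions out) := by unfold Spec_group_by_ticker; infer_instance

-- ===== CLAIM (what is proved, stated in full; the proofs are below) =====
def Claim_equal_group_by_ticker : Prop := ∀ (transactions : List (List (String × String))), Dom_group_by_ticker transactions → Spec_group_by_ticker transactions (group_by_ticker transactions)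

-- ===== LEMMAS AND PROOFS =====

-- A's "create-if-missing then append" step equals a single modify with default []
theorem stepA_eq_modify (g : PySem.Dict String (List (List (String × String)))) (t : String)
    (txn : List (String × String)) :
    (if g.contains t then g else g.insert t []).modify t [] (· ++ [txn])
      = g.modify t [] (· ++ [txn]) := by
  by_cases h : g.contains t = true
  · simp [h]
  · have h' : g.contains t = false := eq_false_of_ne_true h
    simp [h', PySem.Dict.modify, PySem.Dict.insert_insert_self, PySem.Dict.getD_insert_self,
      PySem.Dict.getD_of_not_contains _ _ h']

theorem group_by_ticker_spec : Claim_equal_group_by_ticker := by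
  intro ts _
  show group_by_ticker ts = group_by_ticker_alt ts
  unfold group_by_ticker group_by_ticker_alt
  simp only [stepA_eq_modify]
  have hfold : ts.foldl (fun g txn => g.modify (tickerOf txn) [] (· ++ [txn])) PySem.Dict.empty
      = (ts.map (fun txn => (tickerOf txn, txn))).foldl
          (fun g p => g.modify p.1 [] (· ++ [p.2])) PySem.Dict.empty := by
    rw [List.foldl_map]
  rw [hfold]
  set l := ts.map (fun txn => (tickerOf txn, txn)) with hl
  set D := l.foldl (fun g p => g.modify p.1 [] (· ++ [p.2])) PySem.Dict.empty with hD
  have hnd : D.keys.Nodup := by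
    rw [hD]
    exact PySem.Dict.nodup_keys_foldl_modify_key l Prod.fst [] _ _ PySem.Dict.nodup_keys_empty
  have hkeys : D.keys = PySem.List.dedup (ts.map tickerOf) := by
    rw [hD, PySem.Dict.keys_foldl_modify_key]
    simp [hl, PySem.Set.update, PySem.Set.ofList, PySem.Dict.keys_empty, Function.comp_def]
  have hget : ∀ k, D.getD k [] = ts.filter (fun txn => tickerOf txn == k) := by
    intro k
    rw [hD, PySem.Dict.getD_foldl_modify_append]
    simp [hl, List.filter_map, Function.comp_def]
  rw [PySem.Dict.items_eq_map_keys D hnd [], hkeys]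
  apply List.map_congr_left
  intro k _
  rw [hget]
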